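-- pv_equiv track=rewrite | github.com/OLVXX/rzeczy_szkola | python/zad5/zad5.py | zadanie_2
-- ===== SOURCE A (Python) =====
-- def zadanie_2(obraz):
--     def czy_symetryczny(wiersz):
--         return all(wiersz[i] == wiersz[-i-1] for i in range(len(wiersz)//2))
--
--     liczba_usunietych = 0
--     while obraz:
--         if czy_symetryczny(obraz[0]):
--             break
--         obraz.pop(0)
--         liczba_usunietych += 1
--     return liczba_usunietych
-- ===== SOURCE B (Python) =====
-- def zadanie_2(obraz):
--     i = next((j for j, w in enumerate(obraz) if w == w[::-1]), len(obraz))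
--     del obraz[:i]
--     return i
-- ===== Notes on version B (the rewrite author's own statement) =====
-- stated objective: idiomatic
-- what changed: B locates the index of the first palindromic row with a single next(...) scan (comparing each row with its reversal) and then strips the prefix with one bulk 'del obraz[:i]', instead of A's interleaved per-row half-index symmetry test plus repeated O(n) pop(0) mutations.
import Mathlib
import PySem

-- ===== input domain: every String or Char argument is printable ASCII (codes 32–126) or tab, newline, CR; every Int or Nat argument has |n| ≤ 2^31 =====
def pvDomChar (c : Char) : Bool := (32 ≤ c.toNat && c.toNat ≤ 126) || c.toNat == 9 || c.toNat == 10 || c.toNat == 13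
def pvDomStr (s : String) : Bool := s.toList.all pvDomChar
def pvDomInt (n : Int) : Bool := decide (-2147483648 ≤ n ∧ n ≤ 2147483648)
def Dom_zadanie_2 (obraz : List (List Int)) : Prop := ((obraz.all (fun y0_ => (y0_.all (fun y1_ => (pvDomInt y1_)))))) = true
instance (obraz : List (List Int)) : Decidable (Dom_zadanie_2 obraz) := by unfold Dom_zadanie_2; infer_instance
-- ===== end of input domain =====

-- B separates finding the first palindromic row (one scan, row == reversed row) from one bulk prefix deletion,
-- instead of A's interleaved symmetry test + pop(0) loop; equivalence proved for the RETURN value (both Pythons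
-- perform the identical in-place mutation, which the ports do not model).

-- ===== PORT A =====
-- czy_symetryczny: all(wiersz[i] == wiersz[-i-1] for i in range(len(wiersz)//2))
def pvCzySym (w : List Int) : Bool :=
  (PySem.List.pyRange 0 (PySem.Int.floordiv (PySem.List.len w) 2) 1).all
    (fun i => PySem.List.pyGet? w i == PySem.List.pyGet? w (-i - 1))

-- the while-loop: test head, pop(0), count
def pvLoopA : List (List Int) → Int → Int
  | [], acc => acc
  | h :: t, acc => if pvCzySym h then acc else pvLoopA t (acc + 1)

def zadanie_2 (obraz : List (List Int)) : Int := pvLoopA obraz 0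

-- ===== PORT B =====
-- next((j for j, w in enumerate(obraz) if w == w[::-1]), len(obraz))
def pvFindB : List (List Int) → Int → Option Int
  | [], _ => none
  | w :: t, j =>
      if some w == PySem.List.slice? w none none (-1) then some j else pvFindB t (j + 1)

def zadanie_2_alt (obraz : List (List Int)) : Int :=
  (pvFindB obraz 0).getD (PySem.List.len obraz)

-- ===== PRECONDITION & SPEC =====
def Spec_zadanie_2 (obraz : List (List Int)) (out : Int) : Prop := out = zadanie_2_alt obraz
instance (obraz : List (List Int)) (out : Int) : Decidable (Spec_zadanie_2 obraz out) := by unfold Spec_zadanie_2; infer_instance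

-- ===== CLAIM (what is proved, stated in full; the proofs are below) =====
def Claim_equal_zadanie_2 : Prop := ∀ (obraz : List (List Int)), Dom_zadanie_2 obraz → Spec_zadanie_2 obraz (zadanie_2 obraz)

-- ===== LEMMAS AND PROOFS =====

-- A's half-range symmetry test decides exactly "the row is its own reverse".
theorem pvCzySym_iff (w : List Int) : pvCzySym w = true ↔ w = w.reverse := by
  unfold pvCzySym
  rw [PySem.List.len_eq]
  rw [show PySem.Int.floordiv (w.length : Int) 2 = ((w.length / 2 : Nat) : Int) from
    PySem.Int.floordiv_natCast w.length 2]
  rw [PySem.List.pyRange_one]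
  simp only [List.all_map, List.all_eq_true, List.mem_range, Function.comp, zero_add, beq_iff_eq]
  constructor
  · intro h
    apply List.ext_getElem?
    intro i
    rcases Nat.lt_or_ge i w.length with hi | hi
    · rw [List.getElem?_reverse hi]
      rcases Nat.lt_or_ge i (w.length / 2) with h2 | h2
      · have := h i h2
        rw [PySem.List.pyGet?_natCast] at this
        rw [show -(i:Int) - 1 = -(((i+1 : Nat)):Int) by push_cast; ring] at this
        rw [PySem.List.pyGet?_neg_natCast w (i+1) (by omega) (by omega)] at this
        rw [this]; congr 1; omega
      · set j := w.length - 1 - i with hj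
        rcases Nat.lt_or_ge j (w.length / 2) with h3 | h3
        · have := h j h3
          rw [PySem.List.pyGet?_natCast] at this
          rw [show -(j:Int) - 1 = -(((j+1 : Nat)):Int) by push_cast; ring] at this
          rw [PySem.List.pyGet?_neg_natCast w (j+1) (by omega) (by omega)] at this
          rw [show w.length - (j + 1) = i by omega] at this
          exact this.symm
        · have : i = j := by omega
          rw [this]
    · rw [List.getElem?_eq_none (by simpa using hi), List.getElem?_eq_none (by simpa using hi)]
  · intro h k hk
    rw [PySem.List.pyGet?_natCast]
    rw [show -(k:Int) - 1 = -(((k+1 : Nat)):Int) by push_cast; ring]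
    rw [PySem.List.pyGet?_neg_natCast w (k+1) (by omega) (by omega)]
    conv_lhs => rw [h]
    rw [List.getElem?_reverse (by omega)]
    congr 1; omega


theorem pvCzySym_eq (w : List Int) :
    pvCzySym w = (some w == PySem.List.slice? w none none (-1)) := by
  rw [PySem.List.slice?_none_none_neg_one]
  rw [Bool.eq_iff_iff, pvCzySym_iff]
  simp

theorem pvLoop_eq_find (l : List (List Int)) (acc : Int) :
    pvLoopA l acc = (pvFindB l acc).getD (acc + PySem.List.len l) := by
  induction l generalizing acc with
  | nil => simp [pvLoopA, pvFindB, PySem.List.len]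
  | cons h t ih =>
      rw [pvLoopA, pvFindB, pvCzySym_eq]
      split
      · simp
      · rw [ih]
        congr 1
        simp [PySem.List.len_eq]
        ring

-- ===== VERDICT (by name: the statement is the Claim_ definition above) =====
theorem zadanie_2_spec : Claim_equal_zadanie_2 := by
  intro obraz _
  unfold Spec_zadanie_2 zadanie_2 zadanie_2_alt
  rw [pvLoop_eq_find, zero_add]
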